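-- pv_equiv track=rewrite | github.com/nightstaker/AISE | src/aise/whatsapp/bridge.py | _parse_mention
-- ===== SOURCE A (Python) =====
-- def _parse_mention(text: str) -> tuple[str, str]:
--     """Parse @mention prefix to route to a specific agent.
--
--     Returns:
--         Tuple of (agent_name, remaining_text). agent_name is empty
--         if no valid mention was found.
--     """
--     mention_map = {
--         "@pm": "product_manager",
--         "@product_manager": "product_manager",
--         "@arch": "architect",
--         "@architect": "architect",
--         "@dev": "developer",
--         "@developer": "developer",
--         "@qa": "qa_engineer",
--         "@qa_engineer": "qa_engineer",
--         "@projmgr": "project_manager",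
--         "@project_manager": "project_manager",
--     }
--
--     lower = text.lower()
--     for prefix, agent_name in mention_map.items():
--         if lower.startswith(prefix + " ") or lower.startswith(prefix + "\n"):
--             body = text[len(prefix) :].strip()
--             return agent_name, body
--         if lower == prefix:
--             return agent_name, ""
--
--     return "", text
-- ===== SOURCE B (Python) =====
-- def _parse_mention(text: str) -> tuple[str, str]:
--     """Parse @mention prefix to route to a specific agent.
--
--     Single scan for the first ' ' or '\n' to isolate the first token,
--     then one dict lookup of that token, instead of trying all ten
--     prefixes with startswith.
--     """
--     mention_map = {
--         "@pm": "product_manager",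
--         "@product_manager": "product_manager",
--         "@arch": "architect",
--         "@architect": "architect",
--         "@dev": "developer",
--         "@developer": "developer",
--         "@qa": "qa_engineer",
--         "@qa_engineer": "qa_engineer",
--         "@projmgr": "project_manager",
--         "@project_manager": "project_manager",
--     }
--
--     lower = text.lower()
--     sep = len(text)
--     for i, ch in enumerate(lower):
--         if ch == ' ' or ch == '\n':
--             sep = i
--             break
--     agent = mention_map.get(lower[:sep])
--     if agent is None:
--         return "", text
--     if sep == len(text):
--         return agent, ""
--     return agent, text[sep:].strip()
-- ===== Notes on version B (the rewrite author's own statement) =====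
-- stated objective: idiomatic
-- what changed: A tries all ten mention prefixes with startswith against the lowered text; B isolates the first token (scan to the first space or newline) and does a single dict lookup of it.
import Mathlib
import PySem

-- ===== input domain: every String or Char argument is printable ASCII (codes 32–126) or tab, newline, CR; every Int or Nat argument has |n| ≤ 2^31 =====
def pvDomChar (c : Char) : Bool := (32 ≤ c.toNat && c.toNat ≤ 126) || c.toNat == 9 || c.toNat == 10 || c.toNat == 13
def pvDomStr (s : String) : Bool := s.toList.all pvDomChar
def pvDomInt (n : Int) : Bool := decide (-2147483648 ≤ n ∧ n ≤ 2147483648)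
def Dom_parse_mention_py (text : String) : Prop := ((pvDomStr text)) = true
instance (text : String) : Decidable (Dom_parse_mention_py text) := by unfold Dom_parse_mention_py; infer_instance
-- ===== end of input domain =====

-- B replaces A's ten startswith trials by one scan for the first ' '/'\n' and a single
-- dict lookup of the first token (objective: idiomatic/alternative decomposition).

-- ===== PORT A =====
-- The dict literal's items, in insertion order (keys ported as List Char: Python
-- string comparison is code-point-wise, so this is exact).
def pvMentionItems : List (List Char × String) :=
  [("@pm".toList, "product_manager"),
   ("@product_manager".toList, "product_manager"),
   ("@arch".toList, "architect"),
   ("@architect".toList, "architect"),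
   ("@dev".toList, "developer"),
   ("@developer".toList, "developer"),
   ("@qa".toList, "qa_engineer"),
   ("@qa_engineer".toList, "qa_engineer"),
   ("@projmgr".toList, "project_manager"),
   ("@project_manager".toList, "project_manager")]

-- 'for prefix, agent in mention_map.items():' as structural recursion over the items.
def pvLoopA (items : List (List Char × String)) (lower tl : List Char) : String × String :=
  match items with
  | [] => ("", String.ofList tl)
  | (p, agent) :: rest =>
    if PySem.Chars.startswith lower (p ++ [' ']) || PySem.Chars.startswith lower (p ++ ['\n']) then
      (agent, String.ofList (PySem.Chars.strip (PySem.List.slice tl (some (p.length : Int)) none)))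
    else if lower = p then (agent, "")
    else pvLoopA rest lower tl

def parse_mention_py (text : String) : String × String :=
  pvLoopA pvMentionItems (PySem.Chars.lower text.toList) text.toList

-- ===== PORT B =====
def pvMentionDict : PySem.Dict String String :=
  PySem.Dict.ofList
    [("@pm", "product_manager"), ("@product_manager", "product_manager"),
     ("@arch", "architect"), ("@architect", "architect"),
     ("@dev", "developer"), ("@developer", "developer"),
     ("@qa", "qa_engineer"), ("@qa_engineer", "qa_engineer"),
     ("@projmgr", "project_manager"), ("@project_manager", "project_manager")]

-- 'sep = len(text); for i, ch in enumerate(lower): if ch in (' ','\n'): sep = i; break'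
def pvFindSep : List Char → Nat
  | [] => 0
  | c :: rest => if c = ' ' ∨ c = '\n' then 0 else pvFindSep rest + 1

def parse_mention_py_alt (text : String) : String × String :=
  let tl := text.toList
  let lower := PySem.Chars.lower tl
  let sep := pvFindSep lower
  match PySem.Dict.get? pvMentionDict (String.ofList (lower.take sep)) with
  | none => ("", String.ofList tl)
  | some agent =>
    if sep = tl.length then (agent, "")
    else (agent, String.ofList (PySem.Chars.strip (tl.drop sep)))

-- ===== PRECONDITION & SPEC =====
def Spec_parse_mention_py (text : String) (out : String × String) : Prop := out = parse_mention_py_alt text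
instance (text : String) (out : String × String) : Decidable (Spec_parse_mention_py text out) := by unfold Spec_parse_mention_py; infer_instance

-- ===== CLAIM (what is proved, stated in full; the proofs are below) =====
def Claim_equal_parse_mention_py : Prop := ∀ (text : String), Dom_parse_mention_py text → Spec_parse_mention_py text (parse_mention_py text)

-- ===== LEMMAS AND PROOFS =====
def pvSepFree (p : List Char) : Prop := ∀ c ∈ p, c ≠ ' ' ∧ c ≠ '\n'

theorem pvSepFree_of_all (p : List Char)
    (h : p.all (fun c => !(c == ' ' || c == '\n')) = true) : pvSepFree p := by
  intro c hc
  have := List.all_eq_true.mp h c hc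
  simp at this
  tauto

theorem pvFindSep_of_sepFree (p : List Char) (h : pvSepFree p) : pvFindSep p = p.length := by
  induction p with
  | nil => rfl
  | cons c r ih =>
    have hc := h c (by simp)
    have hnc : ¬ (c = ' ' ∨ c = '\n') := by tauto
    simp only [pvFindSep, if_neg hnc, List.length_cons]
    rw [ih (fun d hd => h d (by simp [hd]))]

theorem pvFindSep_append (p : List Char) (c : Char) (r : List Char)
    (h : pvSepFree p) (hc : c = ' ' ∨ c = '\n') :
    pvFindSep (p ++ c :: r) = p.length := by
  induction p with
  | nil => simp [pvFindSep, hc]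
  | cons d q ih =>
    have hd := h d (by simp)
    have hnd : ¬ (d = ' ' ∨ d = '\n') := by tauto
    simp only [List.cons_append, pvFindSep, if_neg hnd, List.length_cons]
    rw [ih (fun e he => h e (by simp [he]))]

theorem pvDrop_findSep (l : List Char) (h : pvFindSep l ≠ l.length) :
    ∃ c r, l.drop (pvFindSep l) = c :: r ∧ (c = ' ' ∨ c = '\n') := by
  induction l with
  | nil => simp [pvFindSep] at h
  | cons c r ih =>
    by_cases hc : c = ' ' ∨ c = '\n'
    · exact ⟨c, r, by simp [pvFindSep, hc], hc⟩
    · have h' : pvFindSep r ≠ r.length := by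
        simp only [pvFindSep, if_neg hc, List.length_cons] at h
        omega
      obtain ⟨d, s, hds, hd⟩ := ih h'
      exact ⟨d, s, by simpa [pvFindSep, hc] using hds, hd⟩

theorem pvBridge (p l : List Char) (h : pvSepFree p) :
    ((PySem.Chars.startswith l (p ++ [' ']) || PySem.Chars.startswith l (p ++ ['\n'])) = true ∨ l = p)
      ↔ p = l.take (pvFindSep l) := by
  constructor
  · rintro (hsw | hl)
    · rw [Bool.or_eq_true, PySem.Chars.startswith_iff, PySem.Chars.startswith_iff] at hsw
      obtain ⟨c, hc, t, ht⟩ : ∃ c, (c = ' ' ∨ c = '\n') ∧ ∃ t, p ++ [c] ++ t = l := by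
        rcases hsw with ⟨t, h1⟩ | ⟨t, h1⟩
        · exact ⟨' ', Or.inl rfl, t, h1⟩
        · exact ⟨'\n', Or.inr rfl, t, h1⟩
      have hl : l = p ++ c :: t := by rw [← ht]; simp
      rw [hl, pvFindSep_append p c t h hc]
      simp
    · subst hl
      rw [pvFindSep_of_sepFree l h, List.take_length]
  · intro hp
    by_cases hend : pvFindSep l = l.length
    · right
      rw [hp, hend, List.take_length]
    · obtain ⟨c, r, hdrop, hc⟩ := pvDrop_findSep l hend
      have hl : l = p ++ c :: r := by
        conv_lhs => rw [← List.take_append_drop (pvFindSep l) l]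
        rw [← hp, hdrop]
      left
      rw [Bool.or_eq_true, PySem.Chars.startswith_iff, PySem.Chars.startswith_iff]
      rcases hc with rfl | rfl
      · exact Or.inl ⟨r, by rw [hl]; simp⟩
      · exact Or.inr ⟨r, by rw [hl]; simp⟩

theorem pvLoop_eq (items : List (List Char × String))
    (hfree : ∀ q ∈ items, pvSepFree q.1)
    (l tl : List Char) (hlen : l.length = tl.length) :
    pvLoopA items l tl =
      match (Option.map (fun x => x.2)
          (List.find? (fun q => q.1 == String.ofList (l.take (pvFindSep l)))
            (items.map (fun q => (String.ofList q.1, q.2))))) with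
      | none => ("", String.ofList tl)
      | some agent =>
        if pvFindSep l = tl.length then (agent, "")
        else (agent, String.ofList (PySem.Chars.strip (tl.drop (pvFindSep l)))) := by
  induction items with
  | nil => simp [pvLoopA]
  | cons q rest ih =>
    obtain ⟨p, agent⟩ := q
    have hp : pvSepFree p := hfree (p, agent) (by simp)
    simp only [pvLoopA, List.map_cons, List.find?_cons]
    by_cases hsw : (PySem.Chars.startswith l (p ++ [' ']) || PySem.Chars.startswith l (p ++ ['\n'])) = true
    · -- A takes the startswith branch; B finds the same entry, sep strictly inside
      have hm : p = l.take (pvFindSep l) := (pvBridge p l hp).mp (Or.inl hsw)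
      have hkey : (String.ofList p == String.ofList (l.take (pvFindSep l))) = true := by
        simp [hm]
      obtain ⟨c, hc, t, ht⟩ : ∃ c, (c = ' ' ∨ c = '\n') ∧ ∃ t, p ++ [c] ++ t = l := by
        rw [Bool.or_eq_true, PySem.Chars.startswith_iff, PySem.Chars.startswith_iff] at hsw
        rcases hsw with ⟨t, h1⟩ | ⟨t, h1⟩
        · exact ⟨' ', Or.inl rfl, t, h1⟩
        · exact ⟨'\n', Or.inr rfl, t, h1⟩
      have hl : l = p ++ c :: t := by rw [← ht]; simp
      have hsep : pvFindSep l = p.length := by rw [hl]; exact pvFindSep_append p c t hp hc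
      have hne : pvFindSep l ≠ tl.length := by
        have : l.length = p.length + (t.length + 1) := by rw [hl]; simp
        omega
      rw [if_pos hsw]
      simp only [hkey, Option.map_some]
      rw [if_neg hne, PySem.List.slice_from_natCast, hsep]
    · rw [if_neg hsw]
      by_cases heq : l = p
      · -- A takes the exact-equality branch; B finds the same entry with sep = len
        have hm : p = l.take (pvFindSep l) := (pvBridge p l hp).mp (Or.inr heq)
        have hkey : (String.ofList p == String.ofList (l.take (pvFindSep l))) = true := by
          simp [hm]
        have hsep : pvFindSep l = tl.length := by
          rw [← hlen, heq, pvFindSep_of_sepFree p hp]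
        rw [if_pos heq]
        simp only [hkey, Option.map_some]
        rw [if_pos hsep]
      · -- entry matches on neither side: both skip it
        have hm : p ≠ l.take (pvFindSep l) := by
          intro hp'
          rcases (pvBridge p l hp).mpr hp' with h' | h'
          · exact hsw h'
          · exact heq h'
        have hkey : (String.ofList p == String.ofList (l.take (pvFindSep l))) = false := by
          simp only [beq_eq_false_iff_ne, ne_eq, String.ofList_inj]
          exact hm
        rw [if_neg heq]
        simp only [hkey]
        exact ih (fun q hq => hfree q (by simp [hq]))

-- ===== VERDICT (by name: the statement is the Claim_ definition above) =====
set_option maxRecDepth 8192 in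
theorem parse_mention_py_spec : Claim_equal_parse_mention_py := by
  intro text _
  show parse_mention_py text = parse_mention_py_alt text
  unfold parse_mention_py parse_mention_py_alt
  have hlen : (PySem.Chars.lower text.toList).length = text.toList.length := by
    simp [PySem.Chars.lower]
  have hfree : ∀ q ∈ pvMentionItems, pvSepFree q.1 := by
    intro q hq
    apply pvSepFree_of_all
    fin_cases hq <;> decide
  rw [pvLoop_eq pvMentionItems hfree _ _ hlen]
  have hitems : pvMentionItems.map (fun q => (String.ofList q.1, q.2)) = pvMentionDict.items := by decide
  simp only [PySem.Dict.get?, hitems]
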